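-- pv_equiv track=rewrite | github.com/HarveyPost/Intro-to-Programming | Coursework/cwk1.py | valid_puzzle
-- ===== SOURCE A (Python) =====
-- def valid_puzzle(puzzle: list) -> bool:
--     # Check if puzzle is a list of strings with at least 2 strings
--     if not isinstance(puzzle, list) or len(puzzle) < 2:
--         return False
--     for i in puzzle:
--         # Check if each string is a string, is the same length as the first, and is alphabetical
--         if not isinstance(i, str):
--             return False
--         if len(i) != len(puzzle[0]):
--             return False
--         if not i.isalpha():
--             return False
--     return True
-- ===== SOURCE B (Python) =====
-- def valid_puzzle(puzzle: list) -> bool: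
--     # Validate by concatenation: one isalpha() call on the joined text plus a
--     # min/max equality on the lengths, instead of a per-element fused loop.
--     # Correct because: with all lengths equal and the list non-empty, the join
--     # is alphabetic iff every string is non-empty and alphabetic.
--     if not isinstance(puzzle, list) or len(puzzle) < 2:
--         return False
--     if not all(isinstance(s, str) for s in puzzle):
--         return False
--     lengths = [len(s) for s in puzzle]
--     return min(lengths) == max(lengths) and "".join(puzzle).isalpha()
-- ===== Notes on version B (the rewrite author's own statement) =====
-- stated objective: alternative
-- what changed: B validates by concatenation: it joins all strings and makes a single isalpha() call on the joined text, and replaces A's per-element comparison against puzzle[0] by a min/max equality over the list of lengths; A's fused per-element loop of three checks disappears.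
import Mathlib
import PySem

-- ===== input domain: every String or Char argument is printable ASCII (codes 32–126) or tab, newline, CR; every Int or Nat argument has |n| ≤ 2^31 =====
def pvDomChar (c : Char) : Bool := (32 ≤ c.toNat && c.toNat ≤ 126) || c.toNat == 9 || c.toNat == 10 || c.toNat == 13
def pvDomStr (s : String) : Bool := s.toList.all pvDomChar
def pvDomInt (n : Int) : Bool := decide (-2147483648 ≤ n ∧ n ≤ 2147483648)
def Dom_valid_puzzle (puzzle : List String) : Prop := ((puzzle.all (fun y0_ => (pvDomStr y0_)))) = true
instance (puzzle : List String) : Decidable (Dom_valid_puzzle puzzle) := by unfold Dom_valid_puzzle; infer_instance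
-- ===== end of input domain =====

-- Port A = fused per-element loop comparing each entry to puzzle[0]; port B validates by
-- concatenation: one isalpha over the joined text plus a min/max equality over the lengths.
-- Objective: alternative decomposition; same behaviour, same asymptotic cost.


-- ===== PORT A =====
-- the 'for i in puzzle' loop; 'first' is puzzle[0]
def validLoopA (first : String) : List String → Bool
  | [] => true
  | i :: rest =>
    if ¬ (PySem.Str.len i = PySem.Str.len first) then false
    else if ¬ (PySem.Str.strIsalpha i = true) then false
    else validLoopA first rest

def valid_puzzle (puzzle : List String) : Bool :=
  if puzzle.length < 2 then false
  else validLoopA (PySem.List.pyGetD puzzle 0 "") puzzle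

-- ===== PORT B =====
-- Source B: guard, lengths list, then min(lengths)==max(lengths) and "".join(puzzle).isalpha().
-- (The isinstance passes are vacuous under the List String type and are not ported.)
def valid_puzzle_alt (puzzle : List String) : Bool :=
  if puzzle.length < 2 then false
  else
    let lengths := puzzle.map (fun s => PySem.Str.len s)
    (PySem.List.min? lengths (fun x => x) == PySem.List.max? lengths (fun x => x)) &&
      PySem.Str.strIsalpha (PySem.Str.join "" puzzle)

-- ===== PRECONDITION & SPEC =====
def Spec_valid_puzzle (puzzle : List String) (out : Bool) : Prop := out = valid_puzzle_alt puzzle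
instance (puzzle : List String) (out : Bool) : Decidable (Spec_valid_puzzle puzzle out) := by unfold Spec_valid_puzzle; infer_instance

-- ===== CLAIM =====
def Claim_equal_valid_puzzle : Prop := ∀ (puzzle : List String), Dom_valid_puzzle puzzle → Spec_valid_puzzle puzzle (valid_puzzle puzzle)

-- ===== LEMMAS AND PROOFS =====

-- A's loop is the conjunction of the two per-element conditions
theorem validLoopA_eq (first : String) (l : List String) :
    validLoopA first l =
      (l.all (fun i => PySem.Str.len i == PySem.Str.len first) &&
       l.all (fun i => PySem.Str.strIsalpha i)) := by
  induction l with
  | nil => rfl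
  | cons x t ih =>
    simp only [validLoopA, List.all_cons, ih]
    by_cases h1 : PySem.Str.len x = PySem.Str.len first
    · have h1b : (PySem.Str.len x == PySem.Str.len first) = true := beq_iff_eq.mpr h1
      by_cases h2 : PySem.Str.strIsalpha x = true
      · rw [if_neg (not_not_intro h1), if_neg (not_not_intro h2), h1b, h2]
        simp
      · have h2b : PySem.Str.strIsalpha x = false := Bool.eq_false_iff.mpr h2
        rw [if_neg (not_not_intro h1), if_pos h2, h2b]
        simp
    · have h1b : (PySem.Str.len x == PySem.Str.len first) = false := beq_eq_false_iff_ne.mpr h1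
      rw [if_pos h1, h1b]
      simp

-- min == max over a non-empty list iff every element equals the head
theorem min_max_eq_iff (L0 : Int) (Ls : List Int) :
    (PySem.List.min? (L0 :: Ls) (fun x => x) == PySem.List.max? (L0 :: Ls) (fun x => x))
      = Ls.all (fun b => b == L0) := by
  cases hm : PySem.List.min? (L0 :: Ls) (fun x => x) with
  | none => exact absurd ((PySem.List.min?_eq_none_iff _ _).mp hm) (by simp)
  | some m =>
    cases hM : PySem.List.max? (L0 :: Ls) (fun x => x) with
    | none => exact absurd ((PySem.List.max?_eq_none_iff _ _).mp hM) (by simp)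
    | some M =>
      by_cases h : ∀ b ∈ Ls, b = L0
      · have hmem : ∀ z ∈ L0 :: Ls, z = L0 := by
          intro z hz
          rcases List.mem_cons.mp hz with rfl | hz'
          · rfl
          · exact h z hz'
        have hm0 : m = L0 := hmem m (PySem.List.min?_mem hm)
        have hM0 : M = L0 := hmem M (PySem.List.max?_mem hM)
        have hall : Ls.all (fun b => b == L0) = true :=
          List.all_eq_true.mpr (fun b hb => beq_iff_eq.mpr (h b hb))
        rw [hall, hm0, hM0]
        simp
      · rw [not_forall] at h
        simp only [not_forall, exists_prop] at h
        obtain ⟨b, hb, hbne⟩ := h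
        have h1 := PySem.List.min?_isMin hm b (List.mem_cons_of_mem _ hb)
        have h2 := PySem.List.min?_isMin hm L0 (List.mem_cons_self)
        have h3 := PySem.List.max?_isMax hM b (List.mem_cons_of_mem _ hb)
        have h4 := PySem.List.max?_isMax hM L0 (List.mem_cons_self)
        have hne : m ≠ M := by intro hcon; apply hbne; omega
        have hall : Ls.all (fun b => b == L0) = false := by
          rw [List.all_eq_false]; exact ⟨b, hb, by simp [hbne]⟩
        simp [hall, hne]

theorem flatten_intersperse_nil (l : List (List Char)) :
    (List.intersperse ([] : List Char) l).flatten = l.flatten := by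
  induction l with
  | nil => rfl
  | cons x t ih =>
    cases t with
    | nil => rfl
    | cons y u =>
      rw [List.intersperse_cons₂]
      simpa using ih

-- when all strings have the head's length, the join isalpha check is the per-string check
theorem join_alpha_eq (x : String) (rest : List String)
    (h : ∀ s ∈ x :: rest, PySem.Str.len s = PySem.Str.len x) :
    PySem.Str.strIsalpha (PySem.Str.join "" (x :: rest))
      = (x :: rest).all (fun s => PySem.Str.strIsalpha s) := by
  have hlen : ∀ s ∈ x :: rest, s.toList.length = x.toList.length := by
    intro s hs
    have := h s hs
    rw [PySem.Str.len_eq, PySem.Str.len_eq] at this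
    exact_mod_cast this
  rw [PySem.Str.strIsalpha_eq, PySem.Str.toList_join]
  have hjoin : PySem.Chars.join "".toList (List.map String.toList (x :: rest))
      = (List.map String.toList (x :: rest)).flatten := by
    show List.intercalate [] _ = _
    rw [List.intercalate]; exact flatten_intersperse_nil _
  rw [hjoin]
  by_cases hx : x.toList = []
  · -- all strings empty: both sides false
    have hall : ∀ cs ∈ List.map String.toList (x :: rest), cs = [] := by
      intro cs hcs
      obtain ⟨s, hs, rfl⟩ := List.mem_map.mp hcs
      have := hlen s hs
      rw [hx] at this
      exact List.eq_nil_of_length_eq_zero this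
    have hfl : (List.map String.toList (x :: rest)).flatten = [] :=
      List.flatten_eq_nil_iff.mpr hall
    have hxfalse : PySem.Str.strIsalpha x = false := by
      rw [PySem.Str.strIsalpha_eq, hx]; rfl
    rw [hfl, List.all_cons, hxfalse]
    simp [PySem.Chars.strIsalpha]
  · -- all strings non-empty: both sides are "every char alphabetic"
    have hne : ∀ s ∈ x :: rest, s.toList ≠ [] := by
      intro s hs hcon
      apply hx
      have := hlen s hs
      rw [hcon] at this
      exact List.eq_nil_of_length_eq_zero this.symm
    have hflne : (List.map String.toList (x :: rest)).flatten ≠ [] := by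
      intro hcon
      exact hne x List.mem_cons_self (List.flatten_eq_nil_iff.mp hcon _ (by simp))
    have hE : (List.map String.toList (x :: rest)).flatten.isEmpty = false := by
      rw [Bool.eq_false_iff]
      intro hc
      exact hflne (List.isEmpty_iff.mp hc)
    have h1 : PySem.Chars.strIsalpha (List.map String.toList (x :: rest)).flatten
        = (List.map String.toList (x :: rest)).flatten.all PySem.Chars.isalpha := by
      simp only [PySem.Chars.strIsalpha, hE, Bool.not_false, Bool.true_and]
    rw [h1, List.all_flatten, List.all_map]
    have key : ∀ (l : List String), (∀ s ∈ l, s.toList ≠ []) →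
        l.all ((fun cs => cs.all PySem.Chars.isalpha) ∘ String.toList)
          = l.all (fun s => PySem.Str.strIsalpha s) := by
      intro l
      induction l with
      | nil => intro _; rfl
      | cons a u ih =>
        intro hl
        simp only [List.all_cons, ih (fun s hs => hl s (List.mem_cons_of_mem _ hs)),
          Function.comp_apply]
        have ha : PySem.Str.strIsalpha a = a.toList.all PySem.Chars.isalpha := by
          rw [PySem.Str.strIsalpha_eq]
          simp [PySem.Chars.strIsalpha, hl a List.mem_cons_self]
        rw [ha]
    exact key (x :: rest) hne

-- ===== VERDICT =====
theorem valid_puzzle_spec : Claim_equal_valid_puzzle := by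
  intro puzzle _
  unfold Spec_valid_puzzle valid_puzzle valid_puzzle_alt
  match puzzle with
  | [] => rfl
  | [x] => rfl
  | x :: y :: t =>
    have hlen : ¬ (x :: y :: t).length < 2 := by simp
    rw [if_neg hlen, if_neg hlen]
    have h0 : PySem.List.pyGetD (x :: y :: t) 0 "" = x := by
      simp only [PySem.List.pyGetD, PySem.List.pyGet?, PySem.List.pyIdx?]
      rw [if_pos (by positivity), if_pos (by exact_mod_cast Nat.succ_pos (y :: t).length)]
      rfl
    rw [h0, validLoopA_eq]
    show _ = ((PySem.List.min? (PySem.Str.len x :: (y :: t).map (fun s => PySem.Str.len s)) (fun z => z)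
        == PySem.List.max? (PySem.Str.len x :: (y :: t).map (fun s => PySem.Str.len s)) (fun z => z)) &&
        PySem.Str.strIsalpha (PySem.Str.join "" (x :: y :: t)))
    rw [min_max_eq_iff]
    have hmap : ((y :: t).map (fun s => PySem.Str.len s)).all (fun b => b == PySem.Str.len x)
        = (y :: t).all (fun s => PySem.Str.len s == PySem.Str.len x) := by
      rw [List.all_map]; rfl
    rw [hmap]
    by_cases hall : (y :: t).all (fun s => PySem.Str.len s == PySem.Str.len x) = true
    · have hfull : (x :: y :: t).all (fun i => PySem.Str.len i == PySem.Str.len x) = true := by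
        simp only [List.all_cons, beq_self_eq_true, Bool.true_and]; exact hall
      have hprop : ∀ s ∈ x :: y :: t, PySem.Str.len s = PySem.Str.len x := by
        intro s hs
        rcases List.mem_cons.mp hs with rfl | hs'
        · rfl
        · have := (List.all_eq_true.mp hall) s hs'
          exact beq_iff_eq.mp this
      rw [hfull, hall, join_alpha_eq x (y :: t) hprop]
    · have hallf : (y :: t).all (fun s => PySem.Str.len s == PySem.Str.len x) = false :=
        Bool.eq_false_iff.mpr hall
      have hfullf : (x :: y :: t).all (fun i => PySem.Str.len i == PySem.Str.len x) = false := by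
        simp only [List.all_cons, beq_self_eq_true, Bool.true_and]; exact hallf
      rw [hfullf, hallf]
      simp
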